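-- pv_equiv track=rewrite | github.com/SihyeonJeon/factory | run_factory.py | _extract_epics
-- ===== SOURCE A (Python) =====
-- def _extract_epics(prd_text: str) -> list[str]:
--     epics = []
--     current = []
--     in_epic = False
--
--     for line in prd_text.split("\n"):
--         if line.startswith("### Epic"):
--             if current:
--                 epics.append("\n".join(current))
--             current = [line]
--             in_epic = True
--         elif in_epic:
--             if (line.startswith("### ") and not line.startswith("### Epic")) or line.startswith("---"):
--                 epics.append("\n".join(current))
--                 current = []
--                 in_epic = False
--             else:
--                 current.append(line)
--
--     if current:
--         epics.append("\n".join(current))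
--     return epics
-- ===== SOURCE B (Python) =====
-- def _extract_epics(prd_text: str) -> list[str]:
--     lines = prd_text.split("\n")
--     n = len(lines)
--     epics = []
--     i = 0
--     while i < n:
--         if lines[i].startswith("### Epic"):
--             j = i + 1
--             while j < n and not (lines[j].startswith("### ") or lines[j].startswith("---")):
--                 j += 1
--             epics.append("\n".join(lines[i:j]))
--             i = j
--         else:
--             i += 1
--     return epics
-- ===== Notes on version B (the rewrite author's own statement) =====
-- stated objective: alternative
-- what changed: Replaces the foldl-style state machine (epics/current/in_epic accumulator) with a scan-and-slice approach: find each '### Epic' header line, scan forward to the next '### '/'---' boundary, and emit the joined slice directly.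
import Mathlib
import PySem

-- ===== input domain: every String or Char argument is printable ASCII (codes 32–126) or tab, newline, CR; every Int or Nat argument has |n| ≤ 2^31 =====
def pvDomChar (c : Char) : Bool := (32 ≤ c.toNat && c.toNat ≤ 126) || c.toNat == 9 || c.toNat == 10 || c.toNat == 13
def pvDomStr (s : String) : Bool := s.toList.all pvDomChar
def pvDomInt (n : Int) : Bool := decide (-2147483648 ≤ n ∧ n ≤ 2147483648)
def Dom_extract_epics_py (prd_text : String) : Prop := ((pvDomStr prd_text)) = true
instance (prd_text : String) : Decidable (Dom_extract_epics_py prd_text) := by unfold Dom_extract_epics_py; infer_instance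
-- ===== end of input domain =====

-- B replaces A's one-pass epics/current/in_epic state machine with a scan-and-slice pass
-- (find each '### Epic' header, scan forward to the next boundary, join the slice); same cost.

-- ===== PORT A =====
-- the loop body of A's single pass; state = (epics, current, in_epic)
def pvStepA (s : List String × List String × Bool) (line : String) :
    List String × List String × Bool :=
  if PySem.Str.startswith line "### Epic" then
    ((if s.2.1 ≠ [] then s.1 ++ [PySem.Str.join "\n" s.2.1] else s.1), [line], true)
  else if s.2.2 then
    if (PySem.Str.startswith line "### " && !(PySem.Str.startswith line "### Epic"))
        || PySem.Str.startswith line "---" then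
      (s.1 ++ [PySem.Str.join "\n" s.2.1], [], false)
    else
      (s.1, s.2.1 ++ [line], s.2.2)
  else s

def extract_epics_py (prd_text : String) : List String :=
  let st := ((PySem.Str.split? prd_text "\n").getD []).foldl pvStepA ([], [], false)
  if st.2.1 ≠ [] then st.1 ++ [PySem.Str.join "\n" st.2.1] else st.1

-- ===== PORT B =====
-- the inner-while boundary test of B
def pvBoundary (line : String) : Bool :=
  PySem.Str.startswith line "### " || PySem.Str.startswith line "---"

-- B's outer while loop over the line list: the inner 'while j < n and not boundary'
-- scan is takeWhile, and 'i = j' resumes at the first boundary line (drop).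
def pvScanB : List String → List String
  | [] => []
  | l :: rest =>
    if PySem.Str.startswith l "### Epic" then
      let body := rest.takeWhile (fun x => !pvBoundary x)
      PySem.Str.join "\n" (l :: body) :: pvScanB (rest.drop body.length)
    else pvScanB rest
termination_by ls => ls.length
decreasing_by
  · have h1 : (rest.takeWhile (fun x => !pvBoundary x)).length ≤ rest.length :=
      (List.takeWhile_prefix _).length_le
    simp only [List.length_drop, List.length_cons]
    omega
  · simp

def extract_epics_py_alt (prd_text : String) : List String :=
  pvScanB ((PySem.Str.split? prd_text "\n").getD [])

-- ===== PRECONDITION & SPEC =====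
def Spec_extract_epics_py (prd_text : String) (out : List String) : Prop := out = extract_epics_py_alt prd_text
instance (prd_text : String) (out : List String) : Decidable (Spec_extract_epics_py prd_text out) := by unfold Spec_extract_epics_py; infer_instance

-- ===== CLAIM (what is proved, stated in full; the proofs are below) =====
def Claim_equal_extract_epics_py : Prop := ∀ (prd_text : String), Dom_extract_epics_py prd_text → Spec_extract_epics_py prd_text (extract_epics_py prd_text)

-- ===== LEMMAS AND PROOFS =====

-- finalize A's state
def pvFinA (s : List String × List String × Bool) : List String :=
  if s.2.1 ≠ [] then s.1 ++ [PySem.Str.join "\n" s.2.1] else s.1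

theorem pvScanB_nil : pvScanB [] = [] := by simp [pvScanB]

theorem pvScanB_cons (l : String) (t : List String) :
    pvScanB (l :: t) =
      if PySem.Str.startswith l "### Epic" then
        PySem.Str.join "\n" (l :: t.takeWhile (fun x => !pvBoundary x)) ::
          pvScanB (t.drop (t.takeWhile (fun x => !pvBoundary x)).length)
      else pvScanB t := by
  rw [pvScanB]

theorem pvEpic_boundary (l : String) (h : PySem.Str.startswith l "### Epic" = true) :
    pvBoundary l = true := by
  simp only [pvBoundary, Bool.or_eq_true]
  left
  simp only [PySem.Str.startswith_eq] at h ⊢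
  rw [PySem.Chars.startswith_iff] at h ⊢
  exact List.IsPrefix.trans (by decide) h

theorem pvStepA_epic {l : String} (h : PySem.Str.startswith l "### Epic" = true)
    (s : List String × List String × Bool) :
    pvStepA s l = ((if s.2.1 ≠ [] then s.1 ++ [PySem.Str.join "\n" s.2.1] else s.1), [l], true) := by
  simp at h
  simp [pvStepA, h]

theorem pvStepA_idle {l : String} (h : PySem.Str.startswith l "### Epic" = false)
    (es : List String) : pvStepA (es, [], false) l = (es, [], false) := by
  simp at h
  simp [pvStepA, h]

theorem pvStepA_close {l : String} (hE : PySem.Str.startswith l "### Epic" = false)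
    (hB : pvBoundary l = true) (es c : List String) :
    pvStepA (es, c, true) l = (es ++ [PySem.Str.join "\n" c], [], false) := by
  simp at hE
  simp [pvBoundary, Bool.or_eq_true] at hB
  rcases hB with h | h <;> simp [pvStepA, hE, h]

theorem pvStepA_extend {l : String} (hE : PySem.Str.startswith l "### Epic" = false)
    (hB : pvBoundary l = false) (es c : List String) :
    pvStepA (es, c, true) l = (es, c ++ [l], true) := by
  simp at hE
  simp [pvBoundary, Bool.or_eq_false_iff] at hB
  simp [pvStepA, hE, hB.1, hB.2]

-- main invariant: running A's loop from the idle state appends pvScanB of the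
-- remaining lines; from an in-epic state with nonempty current c it closes the
-- current epic at the first boundary and continues.
theorem pvLoop (ls : List String) :
    (∀ es, pvFinA (ls.foldl pvStepA (es, [], false)) = es ++ pvScanB ls) ∧
    (∀ es c, c ≠ [] →
      pvFinA (ls.foldl pvStepA (es, c, true)) =
        es ++ PySem.Str.join "\n" (c ++ ls.takeWhile (fun x => !pvBoundary x)) ::
          pvScanB (ls.drop (ls.takeWhile (fun x => !pvBoundary x)).length)) := by
  induction ls with
  | nil =>
    refine ⟨fun es => by simp [pvFinA, pvScanB_nil], fun es c hc => by simp [pvFinA, hc, pvScanB_nil]⟩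
  | cons l t ih =>
    constructor
    · intro es
      by_cases hE : PySem.Str.startswith l "### Epic" = true
      · rw [List.foldl_cons, pvStepA_epic hE, if_neg (by simp),
          (ih.2) es [l] (by simp), pvScanB_cons, if_pos hE]
        simp
      · rw [List.foldl_cons, pvStepA_idle (by simpa using hE), ih.1 es,
          pvScanB_cons, if_neg hE]
    · intro es c hc
      by_cases hE : PySem.Str.startswith l "### Epic" = true
      · -- a new header closes the current epic and starts a new one
        have hb : pvBoundary l = true := pvEpic_boundary l hE
        rw [List.foldl_cons, pvStepA_epic hE, if_pos hc,
          (ih.2) (es ++ [PySem.Str.join "\n" c]) [l] (by simp),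
          List.takeWhile_cons, hb]
        simp only [Bool.not_true, Bool.false_eq_true, if_false, List.length_nil,
          List.drop_zero, List.append_nil]
        rw [pvScanB_cons, if_pos hE]
        simp
      · have hE' : PySem.Str.startswith l "### Epic" = false := by simpa using hE
        by_cases hB : pvBoundary l = true
        · -- terminator: close current epic, go idle
          rw [List.foldl_cons, pvStepA_close hE' hB, ih.1 (es ++ [PySem.Str.join "\n" c]),
            List.takeWhile_cons, hB]
          simp only [Bool.not_true, Bool.false_eq_true, if_false, List.length_nil,
            List.drop_zero, List.append_nil]
          rw [pvScanB_cons, if_neg hE]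
          simp
        · -- ordinary line: extend current
          have hB' : pvBoundary l = false := by simpa using hB
          rw [List.foldl_cons, pvStepA_extend hE' hB',
            (ih.2) es (c ++ [l]) (by simp),
            List.takeWhile_cons, hB']
          simp only [Bool.not_false, if_pos trivial, List.length_cons, List.drop_succ_cons]
          simp

-- ===== VERDICT (by name: the statement is the Claim_ definition above) =====
theorem extract_epics_py_spec : Claim_equal_extract_epics_py := by
  intro prd_text _
  unfold Spec_extract_epics_py extract_epics_py extract_epics_py_alt
  have h := (pvLoop ((PySem.Str.split? prd_text "\n").getD [])).1 []
  simpa [pvFinA] using h
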